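-- pv_equiv track=rewrite | github.com/IgorTest19/MIW | 02 Zadania/Zadania.py | Zad1
-- ===== SOURCE A (Python) =====
-- def Zad1(a_list, b_list):
--     c_list = []
--     i = 0
--     if len(a_list) > len(b_list):
--         dlugosc = len(a_list)
--     else:
--         dlugosc = len(b_list)
--     while i < dlugosc:
--         if i < len(a_list) and i % 2 == 0:
--             c_list.append(i)
--         if i < len(b_list) and i % 2 != 0:
--             c_list.append(i)
--         i += 1
--     return c_list
-- ===== SOURCE B (Python) =====
-- def Zad1(a_list, b_list):
--     evens = list(range(0, len(a_list), 2))
--     odds = list(range(1, len(b_list), 2))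
--     return sorted(evens + odds)
-- ===== Notes on version B (the rewrite author's own statement) =====
-- stated objective: simpler
-- what changed: Replaces the per-index while loop with its two parity/bounds tests by generating the even and odd valid indices directly as two stepped ranges and merging them into ascending order with sorted.
import Mathlib
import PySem

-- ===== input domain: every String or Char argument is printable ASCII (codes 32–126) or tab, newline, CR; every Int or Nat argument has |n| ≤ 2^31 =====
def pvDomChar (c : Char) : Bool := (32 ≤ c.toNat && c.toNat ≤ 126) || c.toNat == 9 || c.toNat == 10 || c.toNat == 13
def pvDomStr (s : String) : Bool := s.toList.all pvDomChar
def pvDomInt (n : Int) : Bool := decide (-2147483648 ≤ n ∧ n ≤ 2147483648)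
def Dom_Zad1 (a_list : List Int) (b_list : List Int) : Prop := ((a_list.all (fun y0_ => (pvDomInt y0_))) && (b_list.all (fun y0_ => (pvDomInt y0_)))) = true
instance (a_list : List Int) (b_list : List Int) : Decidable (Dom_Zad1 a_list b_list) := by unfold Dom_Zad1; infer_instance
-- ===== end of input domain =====

-- B replaces A's per-index while loop (with its parity/bounds tests) by two stepped
-- ranges of the valid even/odd indices merged into ascending order with sorted ('simpler').

-- ===== PORT A =====
-- the while loop: i counts up to dlugosc, appending i under each of the two tests
def zad1Loop (la lb dlugosc i : Int) (c_list : List Int) : List Int :=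
  if _h : i < dlugosc then
    let c1 := if i < la ∧ PySem.Int.mod i 2 = 0 then c_list ++ [i] else c_list
    let c2 := if i < lb ∧ PySem.Int.mod i 2 ≠ 0 then c1 ++ [i] else c1
    zad1Loop la lb dlugosc (i + 1) c2
  else c_list
termination_by (dlugosc - i).toNat
decreasing_by omega

def Zad1 (a_list : List Int) (b_list : List Int) : List Int :=
  let dlugosc : Int :=
    if (a_list.length : Int) > (b_list.length : Int) then (a_list.length : Int)
    else (b_list.length : Int)
  zad1Loop (a_list.length : Int) (b_list.length : Int) dlugosc 0 []

-- ===== PORT B =====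
def Zad1_alt (a_list : List Int) (b_list : List Int) : List Int :=
  let evens := PySem.List.pyRange 0 (a_list.length : Int) 2
  let odds := PySem.List.pyRange 1 (b_list.length : Int) 2
  PySem.List.sorted (evens ++ odds) (fun x => x) false

-- ===== PRECONDITION & SPEC =====
def Spec_Zad1 (a_list : List Int) (b_list : List Int) (out : List Int) : Prop := out = Zad1_alt a_list b_list
instance (a_list : List Int) (b_list : List Int) (out : List Int) : Decidable (Spec_Zad1 a_list b_list out) := by unfold Spec_Zad1; infer_instance

-- ===== CLAIM (what is proved, stated in full; the proofs are below) =====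
def Claim_equal_Zad1 : Prop := ∀ (a_list : List Int) (b_list : List Int), Dom_Zad1 a_list b_list → Spec_Zad1 a_list b_list (Zad1 a_list b_list)

-- ===== LEMMAS AND PROOFS =====

-- the predicate A's loop body tests at index i
def zad1P (la lb : Int) (i : Int) : Bool :=
  decide ((i < la ∧ i % 2 = 0) ∨ (i < lb ∧ i % 2 ≠ 0))

-- the loop appends exactly the i ∈ [i, dlugosc) passing the test, in order
theorem zad1Loop_eq (la lb dlugosc : Int) :
    ∀ (i : Int) (c : List Int),
      zad1Loop la lb dlugosc i c = c ++ (PySem.List.pyRange i dlugosc 1).filter (zad1P la lb) := by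
  intro i c
  by_cases h : i < dlugosc
  · rw [zad1Loop, dif_pos h, zad1Loop_eq la lb dlugosc (i + 1),
      PySem.List.pyRange_one_cons h, List.filter_cons]
    have hm : PySem.Int.mod i 2 = i % 2 := PySem.Int.mod_eq_emod_of_pos (by omega)
    have hi2 : i % 2 = 0 ∨ i % 2 ≠ 0 := em _
    simp only [hm, zad1P]
    rcases hi2 with h2 | h2 <;> by_cases ha : i < la <;> by_cases hb : i < lb <;>
      simp [h2, ha, hb]
  · rw [zad1Loop, dif_neg h, PySem.List.pyRange_one_eq_nil (by omega)]
    simp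
termination_by i => (dlugosc - i).toNat
decreasing_by omega

theorem mem_Zad1 (a_list b_list : List Int) (x : Int) :
    x ∈ Zad1 a_list b_list ↔
      0 ≤ x ∧ ((x < (a_list.length : Int) ∧ x % 2 = 0) ∨
               (x < (b_list.length : Int) ∧ x % 2 ≠ 0)) := by
  unfold Zad1
  rw [zad1Loop_eq]
  simp only [List.nil_append, List.mem_filter, PySem.List.mem_pyRange_one, zad1P,
    decide_eq_true_eq]
  constructor
  · rintro ⟨⟨h0, _⟩, hp⟩; exact ⟨h0, hp⟩
  · rintro ⟨h0, hp⟩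
    refine ⟨⟨h0, ?_⟩, hp⟩
    rcases hp with ⟨h, _⟩ | ⟨h, _⟩ <;> split <;> omega

theorem pairwise_Zad1 (a_list b_list : List Int) :
    (Zad1 a_list b_list).Pairwise (· < ·) := by
  unfold Zad1
  rw [zad1Loop_eq]
  simpa using (PySem.List.pairwise_lt_pyRange_one _ _).filter _

theorem nodup_Zad1 (a_list b_list : List Int) :
    (Zad1 a_list b_list).Nodup :=
  (pairwise_Zad1 a_list b_list).imp (fun h => Int.ne_of_lt h)

-- membership in B's concatenation of the two stepped ranges
theorem mem_ranges (la lb x : Int) :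
    x ∈ PySem.List.pyRange 0 la 2 ++ PySem.List.pyRange 1 lb 2 ↔
      0 ≤ x ∧ ((x < la ∧ x % 2 = 0) ∨ (x < lb ∧ x % 2 ≠ 0)) := by
  rw [List.mem_append, PySem.List.mem_pyRange_iff_of_pos (by omega) x,
    PySem.List.mem_pyRange_iff_of_pos (by omega) x]
  omega

theorem nodup_ranges (la lb : Int) :
    (PySem.List.pyRange 0 la 2 ++ PySem.List.pyRange 1 lb 2).Nodup := by
  rw [List.nodup_append]
  refine ⟨?_, ?_, ?_⟩
  · rw [PySem.List.pyRange_of_pos 0 la (by omega)]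
    exact List.nodup_range.map (fun p q h => by omega)
  · rw [PySem.List.pyRange_of_pos 1 lb (by omega)]
    exact List.nodup_range.map (fun p q h => by omega)
  · intro x hx y hy
    rw [PySem.List.mem_pyRange_iff_of_pos (by omega) x] at hx
    rw [PySem.List.mem_pyRange_iff_of_pos (by omega) y] at hy
    omega

theorem perm_Zad1_ranges (a_list b_list : List Int) :
    (Zad1 a_list b_list).Perm
      (PySem.List.pyRange 0 (a_list.length : Int) 2 ++
       PySem.List.pyRange 1 (b_list.length : Int) 2) := by
  rw [List.perm_ext_iff_of_nodup (nodup_Zad1 a_list b_list) (nodup_ranges _ _)]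
  intro x
  rw [mem_Zad1, mem_ranges]

-- ===== VERDICT (by name: the statement is the Claim_ definition above) =====
theorem Zad1_spec : Claim_equal_Zad1 := by
  intro a_list b_list _
  unfold Spec_Zad1 Zad1_alt
  exact (PySem.List.sorted_eq_of_perm_of_pairwise_lt _ _ (fun x => x)
    (perm_Zad1_ranges a_list b_list) (pairwise_Zad1 a_list b_list)).symm
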